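-- pv_equiv track=rewrite | github.com/rlaqjatjr8922/GenshinDPSLab | 검색1/text_analysis.py | count_occurrences_per_doc
-- ===== SOURCE A (Python) =====
-- from collections import Counter
--
-- def count_occurrences_per_doc(docs: list[dict], alias_map: dict[str, str]) -> Counter:
--     counter = Counter()
--
--     for doc in docs:
--         text = "\n".join(
--             part.strip()
--             for part in [
--                 doc.get("title") or "",
--                 doc.get("snippet") or "",
--                 doc.get("content") or "",
--             ]
--             if part and part.strip()
--         )
--
--         if not text:
--             continue
--
--         seen_canonicals = set()
--
--         for alias, canonical in alias_map.items():
--             if canonical in seen_canonicals: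
--                 continue
--
--             if alias in text:
--                 counter[canonical] += 1
--                 seen_canonicals.add(canonical)
--
--     return counter
-- ===== SOURCE B (Python) =====
-- from collections import Counter
--
--
-- def count_occurrences_per_doc(docs: list[dict], alias_map: dict[str, str]) -> Counter:
--     counter = Counter()
--     items = list(alias_map.items())
--     lengths = sorted({len(a) for a, _ in items})
--
--     for doc in docs:
--         text = "\n".join(
--             part.strip()
--             for part in [
--                 doc.get("title") or "",
--                 doc.get("snippet") or "",
--                 doc.get("content") or "",
--             ]
--             if part and part.strip()
--         )
--
--         if not text:
--             continue
--
--         # Build the set of all substrings of `text` whose length is an alias length;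
--         # each alias test then becomes one hash lookup instead of a substring scan.
--         n = len(text)
--         grams = set()
--         for l in lengths:
--             if l > n:
--                 break
--             for i in range(n - l + 1):
--                 grams.add(text[i:i + l])
--
--         for canonical in dict.fromkeys(c for a, c in items if a in grams):
--             counter[canonical] += 1
--
--     return counter
-- ===== Notes on version B (the rewrite author's own statement) =====
-- stated objective: alternative
-- what changed: Instead of scanning the document text once per alias, B builds per document a hash set of all substrings whose length is one of the (sorted, distinct) alias lengths in a single sweep over text positions, so each alias test becomes one set lookup; matched canonicals are then deduped with dict.fromkeys and counted.
import Mathlib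
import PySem

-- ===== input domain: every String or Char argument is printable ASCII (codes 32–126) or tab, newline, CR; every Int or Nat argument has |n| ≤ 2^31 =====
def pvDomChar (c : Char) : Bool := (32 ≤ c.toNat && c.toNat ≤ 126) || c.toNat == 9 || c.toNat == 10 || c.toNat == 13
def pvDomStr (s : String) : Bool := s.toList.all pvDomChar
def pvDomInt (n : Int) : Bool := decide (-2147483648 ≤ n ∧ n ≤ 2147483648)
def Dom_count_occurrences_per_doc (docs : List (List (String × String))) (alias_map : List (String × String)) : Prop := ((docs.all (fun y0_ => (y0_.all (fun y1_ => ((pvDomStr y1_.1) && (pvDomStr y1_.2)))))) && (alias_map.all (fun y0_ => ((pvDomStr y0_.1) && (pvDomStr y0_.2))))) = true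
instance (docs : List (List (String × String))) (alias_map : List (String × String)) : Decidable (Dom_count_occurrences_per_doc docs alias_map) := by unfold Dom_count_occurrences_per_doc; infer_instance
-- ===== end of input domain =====

-- B replaces A's per-alias substring scan of each document by a per-document hash set of
-- all substrings whose length is an alias length, built in one sweep over the text, so
-- each alias test is a single set lookup (objective: alternative algorithm, same results).

-- ===== PORT A =====
-- `doc.get(k) or ""`: dict.get with default None, then `or ""`; on string values this is getD "" (only "" is falsy).
def pvGetPart (doc : PySem.Dict String String) (k : String) : String :=
  (doc.get? k).getD ""

-- counter[canonical] += 1  (Counter: missing key reads as 0)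
def pvBump (c : PySem.Dict String Int) (k : String) : PySem.Dict String Int :=
  PySem.Dict.modify c k 0 (· + 1)

-- text = "\n".join(part.strip() for part in parts if part and part.strip())   (identical in A and B)
def pvText (doc : PySem.Dict String String) : String :=
  PySem.Str.join "\n"
    (([pvGetPart doc "title", pvGetPart doc "snippet", pvGetPart doc "content"].filter
        (fun p => !(p == "") && !(PySem.Str.strip p == ""))).map PySem.Str.strip)

-- the body of A's inner `for alias, canonical in alias_map.items():` loop
def pvStepA (text : String) (st : PySem.Dict String Int × PySem.Set String)
    (ac : String × String) : PySem.Dict String Int × PySem.Set String :=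
  if PySem.Set.contains st.2 ac.2 then st
  else if PySem.Str.isIn ac.1 text then (pvBump st.1 ac.2, PySem.Set.add st.2 ac.2)
  else st

-- the body of A's outer `for doc in docs:` loop
def pvDocA (items : List (String × String)) (counter : PySem.Dict String Int)
    (docL : List (String × String)) : PySem.Dict String Int :=
  let text := pvText (PySem.Dict.ofList docL)
  if text == "" then counter
  else (items.foldl (pvStepA text) (counter, PySem.Set.empty)).1

def count_occurrences_per_doc (docs : List (List (String × String))) (alias_map : List (String × String)) : List (String × Int) :=
  (docs.foldl (pvDocA (PySem.Dict.ofList alias_map).items) PySem.Dict.empty).items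

-- ===== PORT B =====
-- lengths = sorted({len(a) for a, _ in items})
def pvLens (items : List (String × String)) : List Int :=
  PySem.List.sorted (PySem.Set.ofList (items.map (fun ac => PySem.Str.len ac.1))) (fun x => x) false

-- the `for l in lengths: if l > n: break; for i in range(n - l + 1): grams.add(text[i:i+l])` loop
def pvGramsLoop (text : List Char) (n : Int) : List Int → PySem.Set String → PySem.Set String
  | [], g => g
  | l :: rest, g =>
    if l > n then g
    else pvGramsLoop text n rest
      ((PySem.List.pyRange 0 (n - l + 1) 1).foldl
        (fun g i => PySem.Set.add g (String.ofList (PySem.List.slice text (some i) (some (i + l))))) g)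

-- the body of B's `for doc in docs:` loop
def pvDocB (items : List (String × String)) (lens : List Int) (counter : PySem.Dict String Int)
    (docL : List (String × String)) : PySem.Dict String Int :=
  let text := pvText (PySem.Dict.ofList docL)
  if text == "" then counter
  else
    let grams := pvGramsLoop text.toList (PySem.Str.len text) lens PySem.Set.empty
    (PySem.List.dedup ((items.filter (fun ac => PySem.Set.contains grams ac.1)).map (·.2))).foldl
      pvBump counter

def count_occurrences_per_doc_alt (docs : List (List (String × String))) (alias_map : List (String × String)) : List (String × Int) :=
  let items := (PySem.Dict.ofList alias_map).items
  (docs.foldl (pvDocB items (pvLens items)) PySem.Dict.empty).items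

-- ===== PRECONDITION & SPEC =====
def Spec_count_occurrences_per_doc (docs : List (List (String × String))) (alias_map : List (String × String)) (out : List (String × Int)) : Prop := out = count_occurrences_per_doc_alt docs alias_map
instance (docs : List (List (String × String))) (alias_map : List (String × String)) (out : List (String × Int)) : Decidable (Spec_count_occurrences_per_doc docs alias_map out) := by unfold Spec_count_occurrences_per_doc; infer_instance

-- ===== CLAIM (what is proved, stated in full; the proofs are below) =====
def Claim_equal_count_occurrences_per_doc : Prop := ∀ (docs : List (List (String × String))) (alias_map : List (String × String)), Dom_count_occurrences_per_doc docs alias_map → Spec_count_occurrences_per_doc docs alias_map (count_occurrences_per_doc docs alias_map)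

-- ===== LEMMAS AND PROOFS =====

lemma filter_discard_of_mem {seen : PySem.Set String} {cn : String}
    (hs : PySem.Set.contains seen cn = true) (s : List String) :
    (PySem.Set.discard s cn).filter (fun y => !(PySem.Set.contains seen y))
      = s.filter (fun y => !(PySem.Set.contains seen y)) := by
  rw [PySem.Set.discard, List.filter_filter]
  apply List.filter_congr
  intro y _
  have hs2 : cn ∈ seen := by
    simpa [PySem.Set.contains] using hs
  by_cases hy : y = cn
  · subst hy
    simp [hs2]
  · simp [hy]

lemma filter_add_eq {seen : PySem.Set String} {cn : String}
    (hs : PySem.Set.contains seen cn = false) (s : List String) :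
    s.filter (fun y => !(PySem.Set.contains (PySem.Set.add seen cn) y))
      = (PySem.Set.discard s cn).filter (fun y => !(PySem.Set.contains seen y)) := by
  rw [PySem.Set.discard, List.filter_filter]
  apply List.filter_congr
  intro y _
  have hns : cn ∉ seen := by
    simpa [PySem.Set.contains] using hs
  have hadd : PySem.Set.add seen cn = seen ++ [cn] := by
    simp [PySem.Set.add, PySem.Set.contains, hns]
  by_cases hy : y = cn
  · subst hy
    simp [hadd, PySem.Set.contains]
  · simp [hadd, PySem.Set.contains, hy]

-- A's inner scan with a `seen` set = bumping the counter once per matched canonical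
-- not yet in `seen`, in first-match order.
lemma inner_eq (text : String) (items : List (String × String))
    (c : PySem.Dict String Int) (seen : PySem.Set String) :
    (items.foldl (pvStepA text) (c, seen)).1
      = ((PySem.List.dedup ((items.filter (fun ac => PySem.Str.isIn ac.1 text)).map (·.2))).filter
          (fun cn => !(PySem.Set.contains seen cn))).foldl pvBump c := by
  induction items generalizing c seen with
  | nil => rfl
  | cons ac rest ih =>
    obtain ⟨a, cn⟩ := ac
    rw [List.foldl_cons, List.filter_cons]
    by_cases hm : PySem.Str.isIn a text = true
    · simp only [hm, if_true, List.map_cons, PySem.List.dedup, PySem.Set.ofList_cons,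
        List.filter_cons]
      by_cases hs : PySem.Set.contains seen cn = true
      · have hsm : cn ∈ seen := by simpa [PySem.Set.contains] using hs
        have hstep : pvStepA text (c, seen) (a, cn) = (c, seen) := by
          unfold pvStepA; simp [hsm]
        rw [hstep, ih, hs]
        simp only [Bool.not_true, Bool.false_eq_true, if_false]
        rw [filter_discard_of_mem hs]
        simp [PySem.List.dedup]
      · have hs' : PySem.Set.contains seen cn = false := by
          simpa using hs
        have hsm : cn ∉ seen := by simpa [PySem.Set.contains] using hs'
        have hmc : PySem.Chars.isIn a.toList text.toList = true := hm
        have hstep : pvStepA text (c, seen) (a, cn) = (pvBump c cn, PySem.Set.add seen cn) := by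
          unfold pvStepA; simp [hsm, hmc]
        rw [hstep, ih, hs']
        simp only [Bool.not_false, if_true, List.foldl_cons]
        rw [filter_add_eq hs']
        simp [PySem.List.dedup]
    · have hm' : PySem.Str.isIn a text = false := by simpa using hm
      have hmc : PySem.Chars.isIn a.toList text.toList = false := hm'
      have hstep : pvStepA text (c, seen) (a, cn) = (c, seen) := by
        unfold pvStepA
        by_cases hs : cn ∈ seen <;> simp [hs, hmc, PySem.Set.contains]
      rw [hstep, ih]
      simp [hmc, PySem.List.dedup]

-- Set.contains is list membership
lemma contains_iff {g : PySem.Set String} {s : String} :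
    PySem.Set.contains g s = true ↔ s ∈ g := by
  simp [PySem.Set.contains]

-- membership after a fold of adds
lemma contains_foldl_add {β : Type} (f : β → String) (is : List β) (g : PySem.Set String)
    (s : String) :
    PySem.Set.contains (is.foldl (fun g i => PySem.Set.add g (f i)) g) s = true ↔
      PySem.Set.contains g s = true ∨ ∃ i ∈ is, f i = s := by
  induction is generalizing g with
  | nil => simp
  | cons i rest ih =>
    rw [List.foldl_cons, ih]
    rw [show (PySem.Set.contains (PySem.Set.add g (f i)) s = true) ↔ (s ∈ PySem.Set.add g (f i))
        from contains_iff, PySem.Set.mem_add, ← contains_iff]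
    constructor
    · rintro ((hg | hx) | ⟨j, hj, hfj⟩)
      · exact Or.inl hg
      · exact Or.inr ⟨i, List.mem_cons_self .., hx.symm⟩
      · exact Or.inr ⟨j, List.mem_cons_of_mem _ hj, hfj⟩
    · rintro (hg | ⟨j, hj, hfj⟩)
      · exact Or.inl (Or.inl hg)
      · rcases List.mem_cons.1 hj with rfl | hj'
        · exact Or.inl (Or.inr hfj.symm)
        · exact Or.inr ⟨j, hj', hfj⟩

-- every slice of a list is an infix of it
lemma slice_infix (xs : List Char) (a b : Int) :
    PySem.List.slice xs (some a) (some b) <:+: xs :=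
  List.IsInfix.trans (List.take_prefix _ _).isInfix (List.drop_suffix _ _).isInfix

-- pvGramsLoop only grows the set
lemma contains_gramsLoop_mono (t : List Char) (n : Int) (L : List Int) (g : PySem.Set String)
    (s : String) (h : PySem.Set.contains g s = true) :
    PySem.Set.contains (pvGramsLoop t n L g) s = true := by
  induction L generalizing g with
  | nil => exact h
  | cons l rest ih =>
    unfold pvGramsLoop
    by_cases hl : l > n
    · simp only [hl, if_true]; exact h
    · simp only [hl, if_false]
      exact ih _ ((contains_foldl_add _ _ _ _).2 (Or.inl h))

-- soundness: anything in the grams set started in g or is a substring of the text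
lemma gramsLoop_sound (t : List Char) (n : Int) (L : List Int) (g : PySem.Set String)
    (s : String) (h : PySem.Set.contains (pvGramsLoop t n L g) s = true) :
    PySem.Set.contains g s = true ∨ s.toList <:+: t := by
  induction L generalizing g with
  | nil => exact Or.inl h
  | cons l rest ih =>
    unfold pvGramsLoop at h
    by_cases hl : l > n
    · simp only [hl, if_true] at h; exact Or.inl h
    · simp only [hl, if_false] at h
      rcases ih _ h with hg | hinf
      · rcases (contains_foldl_add _ _ _ _).1 hg with hg0 | ⟨i, _, hfi⟩
        · exact Or.inl hg0
        · refine Or.inr ?_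
          have : s.toList = PySem.List.slice t (some i) (some (i + l)) := by
            rw [← hfi, String.toList_ofList]
          rw [this]
          exact slice_infix t i (i + l)
      · exact Or.inr hinf

-- completeness: a substring of the text whose length is a listed length is in the set
lemma gramsLoop_complete (t : List Char) (L : List Int) (g : PySem.Set String)
    (s : String) (hp : L.Pairwise (· ≤ ·)) (hl : (s.toList.length : Int) ∈ L)
    (hin : s.toList <:+: t) :
    PySem.Set.contains (pvGramsLoop t (t.length : Int) L g) s = true := by
  obtain ⟨u, v, huv⟩ := hin
  have hdrop : List.take s.toList.length (List.drop u.length t) = s.toList := by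
    rw [← huv, List.append_assoc, List.drop_left, List.take_left]
  have hlen : u.length + s.toList.length ≤ t.length := by
    have := congrArg List.length huv
    simp only [List.length_append] at this
    omega
  induction L generalizing g with
  | nil => exact absurd hl (List.not_mem_nil)
  | cons l0 rest ih =>
    have hle : (s.toList.length : Int) ≤ (t.length : Int) := by
      have : s.toList.length ≤ t.length := by omega
      exact_mod_cast this
    unfold pvGramsLoop
    have hl0 : ¬ l0 > (t.length : Int) := by
      rcases List.mem_cons.1 hl with heq | hmem
      · omega
      · have := (List.pairwise_cons.1 hp).1 _ hmem
        omega
    simp only [hl0, if_false]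
    by_cases heq : (s.toList.length : Int) = l0
    · apply contains_gramsLoop_mono
      apply (contains_foldl_add _ _ _ _).2
      refine Or.inr ⟨(u.length : Int), ?_, ?_⟩
      · rw [PySem.List.mem_pyRange_one]
        constructor
        · exact_mod_cast Nat.zero_le _
        · omega
      · rw [PySem.List.slice_toNat _ (by exact_mod_cast Nat.zero_le _) (by omega)]
        have h1 : ((u.length : Int) + l0).toNat = u.length + s.toList.length := by omega
        have h2 : ((u.length : Int)).toNat = u.length := by omega
        rw [h1, h2, Nat.add_sub_cancel_left, hdrop]
        exact String.ofList_toList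
    · have hmem : (s.toList.length : Int) ∈ rest := by
        rcases List.mem_cons.1 hl with h' | h'
        · exact absurd h' heq
        · exact h'
      exact ih _ (List.pairwise_cons.1 hp).2 hmem

-- for an alias (its length is listed), grams membership = Python `alias in text`
lemma grams_eq_isIn (text : String) (items : List (String × String)) (ac : String × String)
    (hmem : ac ∈ items) :
    PySem.Set.contains
        (pvGramsLoop text.toList (PySem.Str.len text) (pvLens items) PySem.Set.empty) ac.1
      = PySem.Str.isIn ac.1 text := by
  have hlen : ((ac.1).toList.length : Int) ∈ pvLens items := by
    unfold pvLens
    rw [PySem.List.mem_sorted, PySem.Set.mem_ofList, List.mem_map]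
    exact ⟨ac, hmem, (PySem.Str.len_eq _).symm⟩
  have hpair : (pvLens items).Pairwise (· ≤ ·) := by
    unfold pvLens
    exact PySem.List.sorted_pairwise _ (fun x => x)
  by_cases hin : PySem.Str.isIn ac.1 text = true
  · rw [hin, PySem.Str.len_eq]
    exact gramsLoop_complete _ _ _ _ hpair hlen ((PySem.Str.isIn_iff_infix _ _).1 hin)
  · have hin' : PySem.Str.isIn ac.1 text = false := by simpa using hin
    rw [hin']
    by_contra hc
    have hc' : PySem.Set.contains
        (pvGramsLoop text.toList (PySem.Str.len text) (pvLens items) PySem.Set.empty) ac.1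
        = true := by simpa using hc
    rcases gramsLoop_sound _ _ _ _ _ hc' with he | hinf
    · simp [PySem.Set.contains, PySem.Set.empty] at he
    · exact hin ((PySem.Str.isIn_iff_infix _ _).2 hinf)

lemma doc_step_eq (items : List (String × String)) (counter : PySem.Dict String Int)
    (docL : List (String × String)) :
    pvDocA items counter docL = pvDocB items (pvLens items) counter docL := by
  unfold pvDocA pvDocB
  by_cases h : pvText (PySem.Dict.ofList docL) == ""
  · simp [h]
  · simp only [h, Bool.false_eq_true, if_false]
    rw [inner_eq]
    have hfilter : items.filter
        (fun ac => PySem.Set.contains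
          (pvGramsLoop (pvText (PySem.Dict.ofList docL)).toList
            (PySem.Str.len (pvText (PySem.Dict.ofList docL))) (pvLens items) PySem.Set.empty) ac.1)
        = items.filter (fun ac => PySem.Str.isIn ac.1 (pvText (PySem.Dict.ofList docL))) := by
      apply List.filter_congr
      intro ac hac
      rw [grams_eq_isIn _ _ _ hac]
    rw [hfilter]
    congr 1
    apply (List.filter_eq_self).2
    intro y _
    simp [PySem.Set.contains, PySem.Set.empty]

-- ===== VERDICT (by name: the statement is the Claim_ definition above) =====
theorem count_occurrences_per_doc_spec : Claim_equal_count_occurrences_per_doc := by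
  intro docs alias_map _
  unfold Spec_count_occurrences_per_doc count_occurrences_per_doc count_occurrences_per_doc_alt
  have h : pvDocA (PySem.Dict.ofList alias_map).items
      = pvDocB (PySem.Dict.ofList alias_map).items (pvLens (PySem.Dict.ofList alias_map).items) := by
    funext counter docL
    exact doc_step_eq _ counter docL
  simp only [h]
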